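-- pv_equiv track=rewrite | github.com/Priyankcoder/Codechef_Long-Challenge_Solution | APRIL20B/COVIDLQ.py | codechef
-- ===== SOURCE A (Python) =====
-- def codechef(n,arr):
--     flag = 1
--     #cook your dish here
--     for i in range(len(arr)):
--         if arr[i] == 1 and i < len(arr)-1:
--             for j in range(i+1,min(i+6, len(arr))):
--                 if arr[j] == 0:
--                     continue
--                 else:
--                     return "NO"
--     return "YES"
-- ===== SOURCE B (Python) =====
-- def codechef(n, arr):
--     last_one = None
--     for j, x in enumerate(arr):
--         if x != 0 and last_one is not None and j - last_one <= 5: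
--             return "NO"
--         if x == 1:
--             last_one = j
--     return "YES"
-- ===== Notes on version B (the rewrite author's own statement) =====
-- stated objective: alternative
-- what changed: Replaces the nested anchor-plus-forward-window scan with a single left-to-right pass that remembers the index of the most recent 1 and flags any nonzero element within distance 5 of it.
import Mathlib
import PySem

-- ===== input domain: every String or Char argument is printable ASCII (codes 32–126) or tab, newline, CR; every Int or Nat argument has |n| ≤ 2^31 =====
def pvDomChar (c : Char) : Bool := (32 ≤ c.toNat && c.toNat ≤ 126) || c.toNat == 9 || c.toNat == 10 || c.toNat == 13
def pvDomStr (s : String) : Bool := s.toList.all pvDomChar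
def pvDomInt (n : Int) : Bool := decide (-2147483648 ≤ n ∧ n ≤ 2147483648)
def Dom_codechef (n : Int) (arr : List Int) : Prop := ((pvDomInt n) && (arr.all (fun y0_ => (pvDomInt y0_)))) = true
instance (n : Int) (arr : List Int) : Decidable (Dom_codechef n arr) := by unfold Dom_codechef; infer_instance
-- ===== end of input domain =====

-- One honest line: B replaces A's nested anchor-plus-forward-window scan with a single pass
-- that remembers the index of the most recent 1 (alternative decomposition, same asymptotic cost).

-- ===== PORT A =====
-- inner loop 'for j in range(i+1, min(i+6, len(arr)))' with early 'return "NO"'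
def codechefInner (arr : List Int) : List Int → Option String
  | [] => none
  | j :: js =>
    if PySem.List.pyGetD arr j 0 = 0 then codechefInner arr js else some "NO"

-- outer loop 'for i in range(len(arr))'
def codechefOuter (arr : List Int) : List Int → String
  | [] => "YES"
  | i :: is =>
    if PySem.List.pyGetD arr i 0 = 1 ∧ i < (arr.length : Int) - 1 then
      match codechefInner arr (PySem.List.pyRange (i + 1) (min (i + 6) (arr.length : Int)) 1) with
      | some s => s
      | none => codechefOuter arr is
    else codechefOuter arr is

def codechef (n : Int) (arr : List Int) : String :=
  codechefOuter arr (PySem.List.pyRange 0 (arr.length : Int) 1)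

-- ===== PORT B =====
-- 'last_one is not None and j - last_one <= 5'
def codechefLastCheck (j : Int) : Option Int → Bool
  | some l => decide (j - l ≤ 5)
  | none => false

-- single pass, j = current index, lastOne = index of the most recent 1 seen so far
def codechefAltGo (j : Int) (lastOne : Option Int) : List Int → String
  | [] => "YES"
  | x :: xs =>
    if x ≠ 0 ∧ codechefLastCheck j lastOne = true then "NO"
    else codechefAltGo (j + 1) (if x = 1 then some j else lastOne) xs

def codechef_alt (n : Int) (arr : List Int) : String :=
  codechefAltGo 0 none arr

-- ===== PRECONDITION & SPEC =====
def Spec_codechef (n : Int) (arr : List Int) (out : String) : Prop := out = codechef_alt n arr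
instance (n : Int) (arr : List Int) (out : String) : Decidable (Spec_codechef n arr out) := by unfold Spec_codechef; infer_instance

-- ===== CLAIM (what is proved, stated in full; the proofs are below) =====
def Claim_equal_codechef : Prop := ∀ (n : Int) (arr : List Int), Dom_codechef n arr → Spec_codechef n arr (codechef n arr)

-- ===== LEMMAS AND PROOFS =====

-- common characterisation: some nonzero element lies at most 5 after some 1
def Bad (arr : List Int) : Prop :=
  ∃ k : Nat, k < arr.length ∧ arr.getD k 0 ≠ 0 ∧
    ∃ m : Nat, m < k ∧ arr.getD m 0 = 1 ∧ k ≤ m + 5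

-- B's loop invariant condition
def BadFrom (xs : List Int) (j : Int) (lastOne : Option Int) : Prop :=
  ∃ k : Nat, k < xs.length ∧ xs.getD k 0 ≠ 0 ∧
    ((∃ m : Nat, m < k ∧ xs.getD m 0 = 1 ∧ k ≤ m + 5) ∨
     (∃ l, lastOne = some l ∧ j + k ≤ l + 5))

lemma lastCheck_iff (j : Int) (lastOne : Option Int) :
    codechefLastCheck j lastOne = true ↔ ∃ l, lastOne = some l ∧ j - l ≤ 5 := by
  cases lastOne <;> simp [codechefLastCheck]

lemma inner_NO_iff (arr : List Int) (js : List Int) :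
    codechefInner arr js = some "NO" ↔ ∃ j ∈ js, PySem.List.pyGetD arr j 0 ≠ 0 := by
  induction js with
  | nil => simp [codechefInner]
  | cons j js ih =>
    by_cases h : PySem.List.pyGetD arr j 0 = 0
    · simp [codechefInner, h, ih]
    · simp only [codechefInner, if_neg h, List.mem_cons]
      constructor
      · intro _; exact ⟨j, Or.inl rfl, h⟩
      · intro _; trivial

lemma inner_vals (arr : List Int) (js : List Int) :
    codechefInner arr js = some "NO" ∨ codechefInner arr js = none := by
  induction js with
  | nil => simp [codechefInner]
  | cons j js ih =>
    by_cases h : PySem.List.pyGetD arr j 0 = 0 <;> simp [codechefInner, h, ih]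

lemma outer_NO_iff (arr : List Int) (is : List Int) :
    codechefOuter arr is = "NO" ↔
      ∃ i ∈ is, PySem.List.pyGetD arr i 0 = 1 ∧ i < (arr.length : Int) - 1 ∧
        ∃ j ∈ PySem.List.pyRange (i + 1) (min (i + 6) (arr.length : Int)) 1,
          PySem.List.pyGetD arr j 0 ≠ 0 := by
  induction is with
  | nil => simp [codechefOuter]
  | cons i is ih =>
    by_cases hg : PySem.List.pyGetD arr i 0 = 1 ∧ i < (arr.length : Int) - 1
    · rcases inner_vals arr (PySem.List.pyRange (i + 1) (min (i + 6) (arr.length : Int)) 1) with hin | hin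
      · have hin' := (inner_NO_iff arr _).1 hin
        simp only [codechefOuter, if_pos hg, hin, List.mem_cons]
        constructor
        · intro _; exact ⟨i, Or.inl rfl, hg.1, hg.2, hin'⟩
        · intro _; trivial
      · simp only [codechefOuter, if_pos hg, hin, ih, List.mem_cons]
        constructor
        · rintro ⟨i', hi', h'⟩; exact ⟨i', Or.inr hi', h'⟩
        · rintro ⟨i', hi' | hi', h'⟩
          · subst hi'
            exfalso
            have hNO : codechefInner arr (PySem.List.pyRange (i' + 1) (min (i' + 6) (arr.length : Int)) 1) = some "NO" :=
              (inner_NO_iff arr _).2 h'.2.2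
            rw [hin] at hNO; simp at hNO
          · exact ⟨i', hi', h'⟩
    · simp only [codechefOuter, if_neg hg, ih, List.mem_cons]
      constructor
      · rintro ⟨i', hi', h'⟩; exact ⟨i', Or.inr hi', h'⟩
      · rintro ⟨i', hi' | hi', h'⟩
        · subst hi'; exact absurd ⟨h'.1, h'.2.1⟩ hg
        · exact ⟨i', hi', h'⟩

lemma outer_vals (arr : List Int) (is : List Int) :
    codechefOuter arr is = "NO" ∨ codechefOuter arr is = "YES" := by
  induction is with
  | nil => simp [codechefOuter]
  | cons i is ih =>
    by_cases hg : PySem.List.pyGetD arr i 0 = 1 ∧ i < (arr.length : Int) - 1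
    · rcases inner_vals arr (PySem.List.pyRange (i + 1) (min (i + 6) (arr.length : Int)) 1) with hin | hin <;>
        simp [codechefOuter, hg, hin, ih]
    · simp [codechefOuter, hg, ih]

lemma A_NO_iff (n : Int) (arr : List Int) : codechef n arr = "NO" ↔ Bad arr := by
  unfold codechef
  rw [outer_NO_iff]
  constructor
  · rintro ⟨i, hi, h1, hlt, j, hj, hnz⟩
    rw [PySem.List.mem_pyRange_one] at hi hj
    refine ⟨j.toNat, ?_, ?_, i.toNat, ?_, ?_, ?_⟩
    · omega
    · have hc : (j.toNat : Int) = j := by omega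
      rwa [← hc, PySem.List.pyGetD_natCast] at hnz
    · omega
    · have hc : (i.toNat : Int) = i := by omega
      rwa [← hc, PySem.List.pyGetD_natCast] at h1
    · omega
  · rintro ⟨k, hk, hnz, m, hmk, h1, hle⟩
    refine ⟨(m : Int), ?_, ?_, ?_, (k : Int), ?_, ?_⟩
    · rw [PySem.List.mem_pyRange_one]; omega
    · rwa [PySem.List.pyGetD_natCast]
    · omega
    · rw [PySem.List.mem_pyRange_one]; omega
    · rwa [PySem.List.pyGetD_natCast]

lemma badFrom_cons (x : Int) (rest : List Int) (j : Int) (lastOne : Option Int)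
    (h : ∀ l, lastOne = some l → l < j)
    (hg : ¬ (x ≠ 0 ∧ codechefLastCheck j lastOne = true)) :
    BadFrom (x :: rest) j lastOne ↔ BadFrom rest (j + 1) (if x = 1 then some j else lastOne) := by
  constructor
  · rintro ⟨k, hk, hnz, hd⟩
    match k with
    | 0 =>
      exfalso
      simp only [List.getD_cons_zero] at hnz
      rcases hd with ⟨m, hm, _⟩ | ⟨l, hl, hle⟩
      · omega
      · exact hg ⟨hnz, (lastCheck_iff j lastOne).2 ⟨l, hl, by omega⟩⟩
    | Nat.succ k' =>
      simp only [List.getD_cons_succ] at hnz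
      refine ⟨k', by simpa using hk, hnz, ?_⟩
      rcases hd with ⟨m, hm, h1, hle⟩ | ⟨l, hl, hle⟩
      · match m with
        | 0 =>
          simp only [List.getD_cons_zero] at h1
          right; exact ⟨j, by simp [h1], by omega⟩
        | Nat.succ m' =>
          simp only [List.getD_cons_succ] at h1
          left; exact ⟨m', by omega, h1, by omega⟩
      · have hlj : l < j := h l hl
        by_cases hx : x = 1
        · right; exact ⟨j, by simp [hx], by omega⟩
        · right; exact ⟨l, by simp [hx, hl], by omega⟩
  · rintro ⟨k', hk', hnz, hd⟩
    refine ⟨k' + 1, by simpa using Nat.succ_lt_succ hk', by simpa using hnz, ?_⟩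
    rcases hd with ⟨m', hm', h1, hle⟩ | ⟨l, hl, hle⟩
    · left; exact ⟨m' + 1, by omega, by simpa using h1, by omega⟩
    · by_cases hx : x = 1
      · simp only [if_pos hx] at hl
        injection hl with hl; subst hl
        left; exact ⟨0, by omega, by simp [hx], by omega⟩
      · simp only [if_neg hx] at hl
        right; exact ⟨l, hl, by omega⟩

lemma altGo_NO_iff (xs : List Int) (j : Int) (lastOne : Option Int)
    (h : ∀ l, lastOne = some l → l < j) :
    codechefAltGo j lastOne xs = "NO" ↔ BadFrom xs j lastOne := by
  induction xs generalizing j lastOne with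
  | nil => simp [codechefAltGo, BadFrom]
  | cons x rest ih =>
    by_cases hg : x ≠ 0 ∧ codechefLastCheck j lastOne = true
    · simp only [codechefAltGo, if_pos hg]
      constructor
      · intro _
        rcases hg with ⟨hnz, hm⟩
        rcases (lastCheck_iff j lastOne).1 hm with ⟨l, hl, hle⟩
        exact ⟨0, by simp, by simpa using hnz, Or.inr ⟨l, hl, by omega⟩⟩
      · intro _; trivial
    · simp only [codechefAltGo, if_neg hg]
      rw [ih (j + 1) _ ?_, badFrom_cons x rest j lastOne h hg]
      intro l hl
      by_cases hx : x = 1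
      · simp only [if_pos hx] at hl; injection hl with hl; omega
      · simp only [if_neg hx] at hl; have := h l hl; omega

lemma altGo_vals (xs : List Int) (j : Int) (lastOne : Option Int) :
    codechefAltGo j lastOne xs = "NO" ∨ codechefAltGo j lastOne xs = "YES" := by
  induction xs generalizing j lastOne with
  | nil => simp [codechefAltGo]
  | cons x rest ih =>
    by_cases hg : x ≠ 0 ∧ codechefLastCheck j lastOne = true <;>
      simp [codechefAltGo, hg, ih]

lemma B_NO_iff (n : Int) (arr : List Int) : codechef_alt n arr = "NO" ↔ Bad arr := by
  unfold codechef_alt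
  rw [altGo_NO_iff arr 0 none (by simp)]
  unfold BadFrom Bad
  constructor
  · rintro ⟨k, hk, hnz, hd⟩
    rcases hd with hd | ⟨l, hl, _⟩
    · exact ⟨k, hk, hnz, hd⟩
    · simp at hl
  · rintro ⟨k, hk, hnz, hd⟩
    exact ⟨k, hk, hnz, Or.inl hd⟩

-- ===== VERDICT (by name: the statement is the Claim_ definition above) =====
theorem codechef_spec : Claim_equal_codechef := by
  intro n arr _
  unfold Spec_codechef
  rcases outer_vals arr (PySem.List.pyRange 0 (arr.length : Int) 1) with hA | hA
  · have hA' : codechef n arr = "NO" := hA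
    have hB : codechef_alt n arr = "NO" := (B_NO_iff n arr).2 ((A_NO_iff n arr).1 hA')
    rw [hA', hB]
  · have hA' : codechef n arr = "YES" := hA
    rw [hA']
    rcases altGo_vals arr 0 none with hB | hB
    · exfalso
      have hNO : codechef n arr = "NO" := (A_NO_iff n arr).2 ((B_NO_iff n arr).1 hB)
      rw [hA'] at hNO; exact absurd hNO (by decide)
    · exact hB.symm
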